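-- pv_equiv track=rewrite | github.com/3582730951/E2EE_Windows | tools/rime_dict_prepare.py | inject_import_tables
-- ===== SOURCE A (Python) =====
-- def inject_import_tables(source_text, extra_entries):
--     lines = source_text.splitlines()
--     out = []
--     in_block = False
--     indent = ""
--     existing = set()
--     inserted = False
--     for line in lines:
--         if not in_block:
--             out.append(line)
--             if line.strip() == "import_tables:":
--                 in_block = True
--                 indent = line[: len(line) - len(line.lstrip())] + "  "
--             continue
--         if line.startswith(indent + "- "):
--             entry = line.strip()[2:].strip()
--             existing.add(entry)
--             out.append(line)
--             continue
--         stripped = line.strip()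
--         if stripped == "" or stripped.startswith("#"):
--             out.append(line)
--             continue
--         for entry in extra_entries:
--             if entry not in existing:
--                 out.append(indent + "- " + entry)
--         inserted = True
--         in_block = False
--         out.append(line)
--     if in_block:
--         for entry in extra_entries:
--             if entry not in existing:
--                 out.append(indent + "- " + entry)
--         inserted = True
--     if inserted:
--         return "\n".join(out) + "\n"
--     return source_text
-- ===== SOURCE B (Python) =====
-- def inject_import_tables(source_text, extra_entries):
--     lines = source_text.splitlines()
--     if not any(l.strip() == "import_tables:" for l in lines):
--         return source_text
--     return "\n".join(_inject(lines, extra_entries, set())) + "\n"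
--
--
-- def _inject(rest, extra_entries, existing):
--     """Find the next header in `rest`, absorb its block, splice in the missing
--     entries, and recurse on the lines after the block's terminating line."""
--     h = None
--     for i, line in enumerate(rest):
--         if line.strip() == "import_tables:":
--             h = i
--             break
--     if h is None:
--         return rest
--     header = rest[h]
--     indent = header[: len(header) - len(header.lstrip())] + "  "
--     j = h + 1
--     while j < len(rest):
--         l = rest[j]
--         if l.startswith(indent + "- "):
--             existing.add(l.strip()[2:].strip())
--         elif l.strip() != "" and not l.strip().startswith("#"):
--             break
--         j += 1
--     inserted = [indent + "- " + e for e in extra_entries if e not in existing]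
--     if j < len(rest):
--         # rest[j] terminated the block; it is plain content, never a new header
--         return rest[:j] + inserted + [rest[j]] + _inject(rest[j + 1:], extra_entries, existing)
--     return rest[:j] + inserted
-- ===== Notes on version B (the rewrite author's own statement) =====
-- stated objective: alternative
-- what changed: A's single-pass state machine (in_block/indent/inserted flags threaded through one loop over all lines) is replaced by a recursive decomposition: find the next header line, absorb its block while collecting existing entries, splice the missing entries at the insertion point by list slicing, and recurse on the lines after the block's terminating line.
import Mathlib
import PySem

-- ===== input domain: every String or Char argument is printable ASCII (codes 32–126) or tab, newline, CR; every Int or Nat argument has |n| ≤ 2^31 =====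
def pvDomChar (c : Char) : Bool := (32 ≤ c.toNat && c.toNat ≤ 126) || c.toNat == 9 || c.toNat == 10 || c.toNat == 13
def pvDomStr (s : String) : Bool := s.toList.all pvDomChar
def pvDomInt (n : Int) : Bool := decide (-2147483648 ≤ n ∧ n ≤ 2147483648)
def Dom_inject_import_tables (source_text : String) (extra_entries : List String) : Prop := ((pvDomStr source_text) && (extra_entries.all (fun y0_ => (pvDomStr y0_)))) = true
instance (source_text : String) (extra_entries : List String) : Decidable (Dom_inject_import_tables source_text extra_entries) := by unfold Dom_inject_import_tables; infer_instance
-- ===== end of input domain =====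

-- B replaces A's one-pass in_block/inserted state machine by a recursive
-- "find header, absorb block, splice missing entries, recurse on the tail"
-- decomposition (objective: alternative; same asymptotic cost).
-- Both ports work on `List Char` lines (PySem.Chars primitives are exact there).

-- ===== PORT A =====
-- the body of A's `for line in lines` loop; state = (out, in_block, indent, existing, inserted)
def injStep (es : List (List Char))
    (s : List (List Char) × Bool × List Char × PySem.Set (List Char) × Bool)
    (line : List Char) :
    List (List Char) × Bool × List Char × PySem.Set (List Char) × Bool :=
  match s with
  | (out, in_block, indent, existing, inserted) =>
    if in_block = false then
      -- out.append(line); enter the block if line.strip() == "import_tables:"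
      if PySem.Chars.strip line = "import_tables:".toList then
        -- line[: len(line) - len(line.lstrip())] is a take (slice with nonneg bound)
        (out ++ [line], true,
         line.take (line.length - (PySem.Chars.lstrip line).length) ++ "  ".toList,
         existing, inserted)
      else (out ++ [line], false, indent, existing, inserted)
    else if PySem.Chars.startswith line (indent ++ "- ".toList) then
      -- entry = line.strip()[2:].strip(); [2:] on a list is drop 2 (exact)
      (out ++ [line], true, indent,
       PySem.Set.add existing (PySem.Chars.strip ((PySem.Chars.strip line).drop 2)), inserted)
    else if PySem.Chars.strip line = [] ∨ PySem.Chars.startswith (PySem.Chars.strip line) "#".toList then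
      (out ++ [line], true, indent, existing, inserted)
    else
      -- for entry in extra_entries: if entry not in existing: out.append(indent + "- " + entry)
      (out ++ (es.filter (fun e => !(PySem.Set.contains existing e))).map
                (fun e => indent ++ "- ".toList ++ e) ++ [line],
       false, indent, existing, true)

def inject_import_tables (source_text : String) (extra_entries : List String) : String :=
  let lines := PySem.Chars.splitlines source_text.toList
  let es := extra_entries.map String.toList
  match lines.foldl (injStep es) ([], false, [], PySem.Set.empty, false) with
  | (out, in_block, indent, existing, inserted) =>
    let out' := if in_block then
        out ++ (es.filter (fun e => !(PySem.Set.contains existing e))).map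
                 (fun e => indent ++ "- ".toList ++ e)
      else out
    let inserted' := if in_block then true else inserted
    if inserted' then String.ofList (PySem.Chars.join "\n".toList out' ++ "\n".toList)
    else source_text

-- ===== PORT B =====
-- first line whose strip() == "import_tables:", returned as (before, header, after)
def altSplitHeader : List (List Char) → Option (List (List Char) × List Char × List (List Char))
  | [] => none
  | l :: ls =>
    if PySem.Chars.strip l = "import_tables:".toList then some ([], l, ls)
    else
      match altSplitHeader ls with
      | none => none
      | some (b, h, a) => some (l :: b, h, a)

-- [indent + "- " + e for e in extra_entries if e not in existing]
def altMissing (es : List (List Char)) (indent : List Char) (ex : PySem.Set (List Char)) :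
    List (List Char) :=
  (es.filter (fun e => !(PySem.Set.contains ex e))).map (fun e => indent ++ "- ".toList ++ e)

-- B's `while j < len(rest)` scan: (absorbed block lines, updated existing, remaining lines)
def altScanBlock (indent : List Char) :
    PySem.Set (List Char) → List (List Char) →
    List (List Char) × PySem.Set (List Char) × List (List Char)
  | ex, [] => ([], ex, [])
  | ex, l :: ls =>
    if PySem.Chars.startswith l (indent ++ "- ".toList) then
      let r := altScanBlock indent
        (PySem.Set.add ex (PySem.Chars.strip ((PySem.Chars.strip l).drop 2))) ls
      (l :: r.1, r.2.1, r.2.2)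
    else if PySem.Chars.strip l = [] ∨ PySem.Chars.startswith (PySem.Chars.strip l) "#".toList then
      let r := altScanBlock indent ex ls
      (l :: r.1, r.2.1, r.2.2)
    else ([], ex, l :: ls)

-- termination facts for altInject (cited in its decreasing_by)
theorem altScanBlock_rem_length (indent : List Char) (ex : PySem.Set (List Char))
    (ls : List (List Char)) : (altScanBlock indent ex ls).2.2.length ≤ ls.length := by
  induction ls generalizing ex with
  | nil => simp [altScanBlock]
  | cons l ls ih =>
    simp only [altScanBlock]
    split_ifs with h1 h2 <;> simp <;>
      exact le_trans (ih _) (Nat.le_succ _)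

theorem altSplitHeader_length {rest b : List (List Char)} {h : List Char} {a : List (List Char)}
    (hs : altSplitHeader rest = some (b, h, a)) : rest.length = b.length + 1 + a.length := by
  induction rest generalizing b with
  | nil => simp [altSplitHeader] at hs
  | cons l ls ih =>
    simp only [altSplitHeader] at hs
    split_ifs at hs with h1
    · cases hs; simp; omega
    · cases hh : altSplitHeader ls with
      | none => rw [hh] at hs; cases hs
      | some v =>
        obtain ⟨b', h', a'⟩ := v
        rw [hh] at hs
        cases hs
        have := ih hh
        simp
        omega

-- B's `_inject` recursion
def altInject (es : List (List Char)) (rest : List (List Char)) (ex : PySem.Set (List Char)) :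
    List (List Char) :=
  match hs : altSplitHeader rest with
  | none => rest
  | some (before, hl, after) =>
    let indent := hl.take (hl.length - (PySem.Chars.lstrip hl).length) ++ "  ".toList
    let r := altScanBlock indent ex after
    let ins := altMissing es indent r.2.1
    match hr : r.2.2 with
    | [] => before ++ hl :: r.1 ++ ins
    | t :: ts => before ++ hl :: r.1 ++ ins ++ t :: altInject es ts r.2.1
termination_by rest.length
decreasing_by
  have h1 := altSplitHeader_length hs
  have h2 := altScanBlock_rem_length (hl.take (hl.length - (PySem.Chars.lstrip hl).length) ++ "  ".toList) ex after
  rw [hr] at h2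
  simp at h2 ⊢
  omega

def inject_import_tables_alt (source_text : String) (extra_entries : List String) : String :=
  let lines := PySem.Chars.splitlines source_text.toList
  if lines.any (fun l => PySem.Chars.strip l == "import_tables:".toList) then
    String.ofList (PySem.Chars.join "\n".toList
      (altInject (extra_entries.map String.toList) lines PySem.Set.empty) ++ "\n".toList)
  else source_text

-- ===== PRECONDITION & SPEC =====
def Spec_inject_import_tables (source_text : String) (extra_entries : List String) (out : String) : Prop := out = inject_import_tables_alt source_text extra_entries
instance (source_text : String) (extra_entries : List String) (out : String) : Decidable (Spec_inject_import_tables source_text extra_entries out) := by unfold Spec_inject_import_tables; infer_instance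

-- ===== CLAIM (what is proved, stated in full; the proofs are below) =====
def Claim_equal_inject_import_tables : Prop := ∀ (source_text : String) (extra_entries : List String), Dom_inject_import_tables source_text extra_entries → Spec_inject_import_tables source_text extra_entries (inject_import_tables source_text extra_entries)

-- ===== LEMMAS AND PROOFS =====

-- no header anywhere ↔ altSplitHeader finds nothing
theorem altSplitHeader_none_iff (lines : List (List Char)) :
    altSplitHeader lines = none ↔
      lines.any (fun l => PySem.Chars.strip l == "import_tables:".toList) = false := by
  induction lines with
  | nil => simp [altSplitHeader]
  | cons l ls ih =>
    by_cases h1 : PySem.Chars.strip l = "import_tables:".toList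
    · simp [altSplitHeader, h1]
    · have h1' : (PySem.Chars.strip l == "import_tables:".toList) = false :=
        beq_eq_false_iff_ne.mpr h1
      cases hh : altSplitHeader ls with
      | none =>
        have h4 : altSplitHeader (l :: ls) = none := by
          unfold altSplitHeader; rw [if_neg h1, hh]
        simp [h4]
        exact ⟨by simpa using h1, by simpa using ih.mp hh⟩
      | some v =>
        obtain ⟨b, h, a⟩ := v
        have h2 : ls.any (fun l => PySem.Chars.strip l == "import_tables:".toList) = true := by
          cases hany : ls.any (fun l => PySem.Chars.strip l == "import_tables:".toList)
          · exact absurd (ih.mpr hany) (by simp [hh])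
          · rfl
        have h4 : altSplitHeader (l :: ls) = some (l :: b, h, a) := by
          unfold altSplitHeader; rw [if_neg h1, hh]
        simp [h4]
        exact fun _ => by simpa using h2

-- A's fold over a header-free list just copies it
theorem fold_no_header (es : List (List Char)) (lines : List (List Char))
    (out : List (List Char)) (ind : List Char) (ex : PySem.Set (List Char)) (ins : Bool)
    (h : altSplitHeader lines = none) :
    lines.foldl (injStep es) (out, false, ind, ex, ins) = (out ++ lines, false, ind, ex, ins) := by
  induction lines generalizing out with
  | nil => simp
  | cons l ls ih =>
    simp only [altSplitHeader] at h
    split_ifs at h with h1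
    · cases hh : altSplitHeader ls with
      | none =>
        simp only [List.foldl_cons, injStep, if_neg h1, eq_self_iff_true, if_true]
        rw [ih _ hh]
        simp
      | some v => rw [hh] at h; obtain ⟨b, hd, a⟩ := v; cases h

-- A's fold up to the first header
theorem fold_to_header (es : List (List Char)) {lines b : List (List Char)} {hl : List Char}
    {a : List (List Char)}
    (h : altSplitHeader lines = some (b, hl, a))
    (out : List (List Char)) (ind : List Char) (ex : PySem.Set (List Char)) (ins : Bool) :
    lines.foldl (injStep es) (out, false, ind, ex, ins) =
      a.foldl (injStep es)
        (out ++ b ++ [hl], true,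
         hl.take (hl.length - (PySem.Chars.lstrip hl).length) ++ "  ".toList, ex, ins) := by
  induction lines generalizing out b with
  | nil => simp [altSplitHeader] at h
  | cons l ls ih =>
    simp only [altSplitHeader] at h
    split_ifs at h with h1
    · cases h
      simp only [List.foldl_cons, injStep, if_pos h1, eq_self_iff_true, if_true]
      simp
    · cases hh : altSplitHeader ls with
      | none => rw [hh] at h; cases h
      | some v =>
        obtain ⟨b', hd, a'⟩ := v
        rw [hh] at h
        cases h
        simp only [List.foldl_cons, injStep, if_neg h1, eq_self_iff_true, if_true]
        rw [ih hh]
        simp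

-- A's fold through a block matches altScanBlock
theorem fold_in_block (es : List (List Char)) (ls : List (List Char)) (out : List (List Char))
    (ind : List Char) (ex : PySem.Set (List Char)) (ins : Bool) :
    (∀ blk ex', altScanBlock ind ex ls = (blk, ex', []) →
      ls.foldl (injStep es) (out, true, ind, ex, ins) = (out ++ blk, true, ind, ex', ins)) ∧
    (∀ blk ex' t ts, altScanBlock ind ex ls = (blk, ex', t :: ts) →
      ls.foldl (injStep es) (out, true, ind, ex, ins) =
        ts.foldl (injStep es)
          (out ++ blk ++ altMissing es ind ex' ++ [t], false, ind, ex', true)) := by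
  induction ls generalizing out ex ins with
  | nil =>
    constructor
    · intro blk ex' hq
      simp [altScanBlock, Prod.ext_iff] at hq
      obtain ⟨hb, he⟩ := hq
      subst hb; subst he
      simp
    · intro blk ex' t ts hq
      simp [altScanBlock, Prod.ext_iff] at hq
  | cons l ls ih =>
    by_cases h1 : PySem.Chars.startswith l (ind ++ ['-', ' ']) = true
    · have hsc : altScanBlock ind ex (l :: ls) =
          (l :: (altScanBlock ind (PySem.Set.add ex (PySem.Chars.strip ((PySem.Chars.strip l).drop 2))) ls).1,
           (altScanBlock ind (PySem.Set.add ex (PySem.Chars.strip ((PySem.Chars.strip l).drop 2))) ls).2.1,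
           (altScanBlock ind (PySem.Set.add ex (PySem.Chars.strip ((PySem.Chars.strip l).drop 2))) ls).2.2) := by
        simp [altScanBlock, h1]
      have hstep : (l :: ls).foldl (injStep es) (out, true, ind, ex, ins) =
          ls.foldl (injStep es)
            (out ++ [l], true, ind,
             PySem.Set.add ex (PySem.Chars.strip ((PySem.Chars.strip l).drop 2)), ins) := by
        simp [injStep, h1]
      constructor
      · intro blk ex' hq
        rw [hsc] at hq
        simp only [Prod.ext_iff] at hq
        obtain ⟨hb, he, hr⟩ := hq
        subst hb; subst he
        rw [hstep,
          (ih (out ++ [l]) _ ins).1 _ _ (by rw [← hr])]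
        simp
      · intro blk ex' t ts hq
        rw [hsc] at hq
        simp only [Prod.ext_iff] at hq
        obtain ⟨hb, he, hr⟩ := hq
        subst hb; subst he
        rw [hstep,
          (ih (out ++ [l]) _ ins).2 _ _ _ _ (by rw [← hr])]
        simp
    · by_cases h2 : PySem.Chars.strip l = [] ∨ PySem.Chars.startswith (PySem.Chars.strip l) ['#'] = true
      · have hsc : altScanBlock ind ex (l :: ls) =
            (l :: (altScanBlock ind ex ls).1,
             (altScanBlock ind ex ls).2.1, (altScanBlock ind ex ls).2.2) := by
          simp [altScanBlock, h1, h2]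
        have hstep : (l :: ls).foldl (injStep es) (out, true, ind, ex, ins) =
            ls.foldl (injStep es) (out ++ [l], true, ind, ex, ins) := by
          simp [injStep, h1, h2]
        constructor
        · intro blk ex' hq
          rw [hsc] at hq
          simp only [Prod.ext_iff] at hq
          obtain ⟨hb, he, hr⟩ := hq
          subst hb; subst he
          rw [hstep, (ih (out ++ [l]) ex ins).1 _ _ (by rw [← hr])]
          simp
        · intro blk ex' t ts hq
          rw [hsc] at hq
          simp only [Prod.ext_iff] at hq
          obtain ⟨hb, he, hr⟩ := hq
          subst hb; subst he
          rw [hstep, (ih (out ++ [l]) ex ins).2 _ _ _ _ (by rw [← hr])]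
          simp
      · have hsc : altScanBlock ind ex (l :: ls) = ([], ex, l :: ls) := by
          simp [altScanBlock, h1, h2]
        constructor
        · intro blk ex' hq
          rw [hsc] at hq
          simp [Prod.ext_iff] at hq
        · intro blk ex' t ts hq
          rw [hsc] at hq
          simp only [Prod.ext_iff] at hq
          obtain ⟨hb, he, hr⟩ := hq
          injection hr with ht hts
          subst hb; subst he; subst ht; subst hts
          have hstep : (l :: ls).foldl (injStep es) (out, true, ind, ex, ins) =
              ls.foldl (injStep es)
                (out ++ altMissing es ind ex ++ [l], false, ind, ex, true) := by
            simp [injStep, h1, h2, altMissing]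
          rw [hstep]
          simp

-- finalize: A's epilogue after the fold
def finalizeA (es : List (List Char))
    (s : List (List Char) × Bool × List Char × PySem.Set (List Char) × Bool) :
    List (List Char) × Bool :=
  match s with
  | (out, in_block, indent, existing, inserted) =>
    (if in_block then out ++ altMissing es indent existing else out,
     if in_block then true else inserted)

-- one-step equations for altInject
theorem altInject_none (es : List (List Char)) (lines : List (List Char))
    (ex : PySem.Set (List Char)) (h : altSplitHeader lines = none) :
    altInject es lines ex = lines := by
  rw [altInject]
  split
  · rfl
  · rename_i heq; rw [h] at heq; cases heq

theorem altInject_some_nil {lines b : List (List Char)} {hl : List Char} {a : List (List Char)}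
    (es : List (List Char)) (ex : PySem.Set (List Char))
    (h : altSplitHeader lines = some (b, hl, a))
    (hscr : (altScanBlock (hl.take (hl.length - (PySem.Chars.lstrip hl).length) ++ "  ".toList) ex a).2.2 = []) :
    altInject es lines ex =
      b ++ hl :: (altScanBlock (hl.take (hl.length - (PySem.Chars.lstrip hl).length) ++ "  ".toList) ex a).1 ++
        altMissing es (hl.take (hl.length - (PySem.Chars.lstrip hl).length) ++ "  ".toList)
          ((altScanBlock (hl.take (hl.length - (PySem.Chars.lstrip hl).length) ++ "  ".toList) ex a).2.1) := by
  rw [altInject]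
  split
  · rename_i heq; rw [h] at heq; cases heq
  · rename_i b' hl' a' heq
    rw [h] at heq
    injection heq with heq
    injection heq with h1 heq
    injection heq with h2 h3
    subst h1; subst h2; subst h3
    dsimp only
    split
    · rfl
    · rename_i t ts heq2; rw [hscr] at heq2; cases heq2

theorem altInject_some_cons {lines b : List (List Char)} {hl : List Char} {a : List (List Char)}
    {t : List Char} {ts : List (List Char)}
    (es : List (List Char)) (ex : PySem.Set (List Char))
    (h : altSplitHeader lines = some (b, hl, a))
    (hscr : (altScanBlock (hl.take (hl.length - (PySem.Chars.lstrip hl).length) ++ "  ".toList) ex a).2.2 = t :: ts) :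
    altInject es lines ex =
      b ++ hl :: (altScanBlock (hl.take (hl.length - (PySem.Chars.lstrip hl).length) ++ "  ".toList) ex a).1 ++
        altMissing es (hl.take (hl.length - (PySem.Chars.lstrip hl).length) ++ "  ".toList)
          ((altScanBlock (hl.take (hl.length - (PySem.Chars.lstrip hl).length) ++ "  ".toList) ex a).2.1) ++
        t :: altInject es ts
          ((altScanBlock (hl.take (hl.length - (PySem.Chars.lstrip hl).length) ++ "  ".toList) ex a).2.1) := by
  rw [altInject]
  split
  · rename_i heq; rw [h] at heq; cases heq
  · rename_i b' hl' a' heq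
    rw [h] at heq
    injection heq with heq
    injection heq with h1 heq
    injection heq with h2 h3
    subst h1; subst h2; subst h3
    dsimp only
    split
    · rename_i heq2; rw [hscr] at heq2; cases heq2
    · rename_i t' ts' heq2
      rw [hscr] at heq2
      injection heq2 with h4 h5
      subst h4; subst h5
      rfl

-- main invariant: from a fresh not-in-block state, A's fold + epilogue = out ++ altInject
theorem main_fold (es : List (List Char)) (lines : List (List Char))
    (out : List (List Char)) (ind : List Char) (ex : PySem.Set (List Char)) (ins : Bool)
    (h : altSplitHeader lines ≠ none) :
    finalizeA es (lines.foldl (injStep es) (out, false, ind, ex, ins)) =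
      (out ++ altInject es lines ex, true) := by
  have key : ∀ (n : Nat) (lines : List (List Char)), lines.length ≤ n →
      ∀ (out : List (List Char)) (ind : List Char) (ex : PySem.Set (List Char)) (ins : Bool),
      altSplitHeader lines ≠ none →
      finalizeA es (lines.foldl (injStep es) (out, false, ind, ex, ins)) =
        (out ++ altInject es lines ex, true) := by
    intro n
    induction n with
    | zero =>
      intro lines hn out ind ex ins h
      have : lines = [] := List.length_eq_zero_iff.mp (Nat.le_zero.mp hn)
      subst this
      exact absurd rfl h
    | succ m ih =>
      intro lines hn out ind ex ins h
      cases hsp : altSplitHeader lines with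
      | none => exact absurd hsp h
      | some v =>
        obtain ⟨b, hl, a⟩ := v
        rw [fold_to_header es hsp]
        have hlen := altSplitHeader_length hsp
        set ind' := hl.take (hl.length - (PySem.Chars.lstrip hl).length) ++ "  ".toList with hind
        have hrlen := altScanBlock_rem_length ind' ex a
        cases hscr : (altScanBlock ind' ex a).2.2 with
        | nil =>
          rw [(fold_in_block es a (out ++ b ++ [hl]) ind' ex ins).1
                (altScanBlock ind' ex a).1 (altScanBlock ind' ex a).2.1
                (by rw [← hscr])]
          rw [altInject_some_nil es ex hsp hscr]
          simp [finalizeA]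
          rfl
        | cons t ts =>
          rw [(fold_in_block es a (out ++ b ++ [hl]) ind' ex ins).2
                (altScanBlock ind' ex a).1 (altScanBlock ind' ex a).2.1 t ts
                (by rw [← hscr])]
          by_cases hnone : altSplitHeader ts = none
          · rw [fold_no_header es ts _ _ _ _ hnone]
            rw [altInject_some_cons es ex hsp hscr, altInject_none es ts _ hnone]
            simp [finalizeA]
            rfl
          · have hts : ts.length ≤ m := by
              have : ts.length < (altScanBlock ind' ex a).2.2.length + 1 := by
                rw [hscr]; simp
              omega
            rw [ih ts hts _ ind' _ true hnone]
            rw [altInject_some_cons es ex hsp hscr]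
            simp
            rfl
  exact key lines.length lines le_rfl out ind ex ins h

-- ===== VERDICT (by name: the statement is the Claim_ definition above) =====
theorem inject_import_tables_spec : Claim_equal_inject_import_tables := by
  intro src es _
  unfold Spec_inject_import_tables inject_import_tables inject_import_tables_alt
  dsimp only
  cases hany : (PySem.Chars.splitlines src.toList).any
      (fun l => PySem.Chars.strip l == "import_tables:".toList) with
  | false =>
    have hn := (altSplitHeader_none_iff _).mpr hany
    rw [fold_no_header (es.map String.toList) _ [] [] PySem.Set.empty false hn]
    simp [hany]
  | true =>
    have hn : altSplitHeader (PySem.Chars.splitlines src.toList) ≠ none := by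
      rw [Ne, altSplitHeader_none_iff]; simpa using hany
    have hm := main_fold (es.map String.toList) (PySem.Chars.splitlines src.toList)
      [] [] PySem.Set.empty false hn
    simp only [List.nil_append] at hm
    generalize hF : List.foldl (injStep (List.map String.toList es))
      ([], false, [], PySem.Set.empty, false) (PySem.Chars.splitlines src.toList) = st at *
    obtain ⟨out, ib, ind, exg, ins⟩ := st
    simp only [finalizeA, Prod.mk.injEq] at hm
    obtain ⟨hm1, hm2⟩ := hm
    cases ib
    · simp only [Bool.false_eq_true, if_false] at hm1 hm2
      simp [hm1, hm2]
    · simp only [if_true] at hm1 hm2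
      simp only [altMissing] at hm1
      simp at hm1
      simp [hm1]
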